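-- pv_equiv track=rewrite | github.com/chaimae-marzouki/projet-meta-heuristique | src/utils.py | calculer_cout
-- ===== SOURCE A (Python) =====
-- def calculer_cout(tournee, matrice_dist):
--     """
--     Calcule le coût total d'une tournée.
--     Gère automatiquement la conversion des indices et le retour au départ.
--     """
--     cout = 0
--     n_villes = len(tournee)
--
--     # 1. Calcul du chemin normal (de la ville i à la ville i+1)
--     for i in range(n_villes - 1):
--         # On fait -1 car Python compte à partir de 0 dans la matrice
--         ville_actuelle = tournee[i] - 1
--         ville_suivante = tournee[i+1] - 1
--         cout += matrice_dist[ville_actuelle][ville_suivante]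
--
--     # 2. Ajout automatique du retour à la maison (dernière ville -> première ville)
--     derniere_ville = tournee[-1] - 1
--     premiere_ville = tournee[0] - 1
--     cout += matrice_dist[derniere_ville][premiere_ville]
--
--     return cout
-- ===== SOURCE B (Python) =====
-- def calculer_cout(tournee, matrice_dist):
--     # Recursive decomposition: cost from a city through the remaining tour,
--     # closing the loop back to the first city at the end of the recursion.
--     premiere = tournee[0]
--     def cout_depuis(ville, reste):
--         if not reste:
--             return matrice_dist[ville - 1][premiere - 1]
--         return matrice_dist[ville - 1][reste[0] - 1] + cout_depuis(reste[0], reste[1:])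
--     return cout_depuis(premiere, tournee[1:])
-- ===== Notes on version B (the rewrite author's own statement) =====
-- stated objective: alternative
-- what changed: Replaces A's index loop over range(n-1) plus a separate wrap-around statement by a structural recursion on the tail of the tour: cout_depuis(ville, reste) adds the leg to the next city and recurses, and its base case closes the loop back to the first city, so no indices and no separate return-leg code exist.
import Mathlib
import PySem

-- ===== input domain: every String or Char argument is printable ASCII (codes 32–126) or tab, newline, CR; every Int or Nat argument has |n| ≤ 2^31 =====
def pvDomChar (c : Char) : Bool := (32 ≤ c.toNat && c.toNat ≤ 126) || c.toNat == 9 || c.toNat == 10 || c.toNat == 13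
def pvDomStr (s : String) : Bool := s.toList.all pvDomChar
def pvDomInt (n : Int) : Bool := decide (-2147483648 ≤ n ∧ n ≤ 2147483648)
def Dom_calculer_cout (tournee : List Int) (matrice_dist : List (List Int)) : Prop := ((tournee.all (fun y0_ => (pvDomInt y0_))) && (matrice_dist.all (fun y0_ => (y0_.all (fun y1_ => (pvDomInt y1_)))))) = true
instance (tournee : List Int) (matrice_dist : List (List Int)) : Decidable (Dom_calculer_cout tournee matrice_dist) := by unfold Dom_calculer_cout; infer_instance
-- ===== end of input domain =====

-- B replaces A's index loop plus separate wrap-around statement by a structural recursion on the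
-- tail of the tour whose base case closes the loop back to the first city (alternative decomposition).

-- ===== PORT A =====
def calculer_cout (tournee : List Int) (matrice_dist : List (List Int)) : Int :=
  let n : Int := tournee.length
  let cout : Int := (PySem.List.pyRange 0 (n - 1) 1).foldl
    (fun cout i =>
      let ville_actuelle := PySem.List.pyGetD tournee i 0 - 1
      let ville_suivante := PySem.List.pyGetD tournee (i + 1) 0 - 1
      cout + PySem.List.pyGetD (PySem.List.pyGetD matrice_dist ville_actuelle []) ville_suivante 0) 0
  let derniere_ville := PySem.List.pyGetD tournee (-1) 0 - 1
  let premiere_ville := PySem.List.pyGetD tournee 0 0 - 1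
  cout + PySem.List.pyGetD (PySem.List.pyGetD matrice_dist derniere_ville []) premiere_ville 0

-- ===== PORT B =====
-- helper = Source B's inner recursive function cout_depuis (premiere and matrice_dist are its closure)
def coutDepuis (matrice_dist : List (List Int)) (premiere : Int) : Int → List Int → Int
  | ville, [] => PySem.List.pyGetD (PySem.List.pyGetD matrice_dist (ville - 1) []) (premiere - 1) 0
  | ville, v :: reste =>
      PySem.List.pyGetD (PySem.List.pyGetD matrice_dist (ville - 1) []) (v - 1) 0 +
      coutDepuis matrice_dist premiere v reste

def calculer_cout_alt (tournee : List Int) (matrice_dist : List (List Int)) : Int :=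
  let premiere := PySem.List.pyGetD tournee 0 0
  coutDepuis matrice_dist premiere premiere (PySem.List.slice tournee (some 1) none)

-- ===== PRECONDITION & SPEC =====
-- Pre_ excludes exactly the inputs where Python A raises IndexError: the empty tour, and tours
-- whose traversed matrix indices (row tournee[i]-1, column successor-1, wrap leg included;
-- Python negative indexing applies) fall out of range.
def Pre_calculer_cout (tournee : List Int) (matrice_dist : List (List Int)) : Prop :=
  tournee ≠ [] ∧
  ∀ p ∈ tournee.zip (tournee.tail ++ [tournee.headD 0]),
    PySem.Raise.InRange matrice_dist.length (p.1 - 1) ∧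
    PySem.Raise.InRange (PySem.List.pyGetD matrice_dist (p.1 - 1) []).length (p.2 - 1)
instance (tournee : List Int) (matrice_dist : List (List Int)) : Decidable (Pre_calculer_cout tournee matrice_dist) := by unfold Pre_calculer_cout; infer_instance

def pvWitness_calculer_cout : List Int × List (List Int) := ([1, 3, 2], [[0, 4, 9], [7, 0, 2], [5, 8, 0]])

def Spec_calculer_cout (tournee : List Int) (matrice_dist : List (List Int)) (out : Int) : Prop := out = calculer_cout_alt tournee matrice_dist
instance (tournee : List Int) (matrice_dist : List (List Int)) (out : Int) : Decidable (Spec_calculer_cout tournee matrice_dist out) := by unfold Spec_calculer_cout; infer_instance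

-- ===== CLAIM (what is proved, stated in full; the proofs are below) =====
def Claim_equal_calculer_cout : Prop := ∀ (tournee : List Int) (matrice_dist : List (List Int)), Dom_calculer_cout tournee matrice_dist → Pre_calculer_cout tournee matrice_dist → Spec_calculer_cout tournee matrice_dist (calculer_cout tournee matrice_dist)

-- ===== LEMMAS AND PROOFS =====

-- A's loop visits exactly the consecutive pairs of the tour.
theorem map_pyRange_pairs (t : List Int) :
    (PySem.List.pyRange 0 ((t.length : Int) - 1) 1).map
      (fun i => (PySem.List.pyGetD t i 0, PySem.List.pyGetD t (i + 1) 0))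
      = t.zip t.tail := by
  apply List.ext_getElem
  · simp [PySem.List.length_pyRange_one]
  · intro k h1 h2
    have hlen : (PySem.List.pyRange 0 ((t.length : Int) - 1) 1).length = t.length - 1 := by
      simp [PySem.List.length_pyRange_one]
    simp only [List.length_map, hlen] at h1
    have hk1 : k < t.length := by omega
    have hk2 : k + 1 < t.length := by omega
    simp only [List.getElem_map, PySem.List.getElem_pyRange_one, List.getElem_zip]
    simp only [zero_add]
    have e2 : ((k : Nat) : Int) + 1 = (((k + 1 : Nat)) : Int) := by push_cast; ring
    rw [e2, PySem.List.pyGetD_natCast, PySem.List.pyGetD_natCast]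
    simp [List.getD_eq_getElem?_getD, List.getElem?_eq_getElem hk1,
      List.getElem?_eq_getElem hk2, List.getElem_tail]

-- B's recursion = sum of the consecutive-pair leg costs plus the closing leg from the last city.
theorem coutDepuis_eq (m : List (List Int)) (p v : Int) (rest : List Int) :
    coutDepuis m p v rest
      = (((v :: rest).zip rest).map
          (fun q => PySem.List.pyGetD (PySem.List.pyGetD m (q.1 - 1) []) (q.2 - 1) 0)).sum
        + PySem.List.pyGetD (PySem.List.pyGetD m ((v :: rest).getLast (by simp) - 1) []) (p - 1) 0 := by
  induction rest generalizing v with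
  | nil => simp [coutDepuis]
  | cons b r ih =>
      have hlast : (v :: b :: r).getLast (by simp) = (b :: r).getLast (by simp) := by
        rw [List.getLast_cons]
      simp only [coutDepuis, List.zip_cons_cons, List.map_cons, List.sum_cons, ih b, hlast]
      ring

theorem calculer_cout_spec_aux (tournee : List Int) (matrice_dist : List (List Int))
    (h : tournee ≠ []) :
    calculer_cout tournee matrice_dist = calculer_cout_alt tournee matrice_dist := by
  obtain ⟨a, rest, rfl⟩ := List.exists_cons_of_ne_nil h
  unfold calculer_cout calculer_cout_alt
  simp only []
  rw [PySem.List.foldl_add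
    (g := fun i => PySem.List.pyGetD
      (PySem.List.pyGetD matrice_dist (PySem.List.pyGetD (a :: rest) i 0 - 1) [])
      (PySem.List.pyGetD (a :: rest) (i + 1) 0 - 1) 0)]
  have hmap :
      (PySem.List.pyRange 0 ((((a :: rest).length : Int)) - 1) 1).map
        (fun i => PySem.List.pyGetD
          (PySem.List.pyGetD matrice_dist (PySem.List.pyGetD (a :: rest) i 0 - 1) [])
          (PySem.List.pyGetD (a :: rest) (i + 1) 0 - 1) 0)
      = ((a :: rest).zip (a :: rest).tail).map
        (fun p => PySem.List.pyGetD (PySem.List.pyGetD matrice_dist (p.1 - 1) []) (p.2 - 1) 0) := by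
    rw [← map_pyRange_pairs (a :: rest), List.map_map]
    rfl
  rw [hmap]
  rw [PySem.List.slice_from_one, PySem.List.pyGetD_zero_cons,
    PySem.List.pyGetD_neg_one (xs := a :: rest) (h := h),
    List.tail_cons, coutDepuis_eq matrice_dist a a rest]
  simp

-- ===== VERDICT (by name: the statement is the Claim_ definition above) =====
theorem calculer_cout_spec : Claim_equal_calculer_cout := by
  intro tournee matrice_dist _hdom hpre
  unfold Spec_calculer_cout
  exact calculer_cout_spec_aux tournee matrice_dist hpre.1
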